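-- pv_equiv track=rewrite | github.com/ajayspersonalacc1-beep/ADEA-hackathon | adea/agents/repair_agent.py | _latest_failed_query
-- ===== SOURCE A (Python) =====
-- def _latest_failed_query(execution_logs: list[str]) -> str:
--     """Return the SQL query associated with the most recent failure."""
--
--     failure_index = None
--     for index in range(len(execution_logs) - 1, -1, -1):
--         if "pipeline execution failed" in execution_logs[index].lower():
--             failure_index = index
--             break
--
--     if failure_index is None:
--         return ""
--
--     for index in range(failure_index - 1, -1, -1):
--         log = execution_logs[index]
--         if "SQL Query: " in log:
--             return log.split("SQL Query: ", maxsplit=1)[1].strip()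
--
--     return ""
-- ===== SOURCE B (Python) =====
-- def _latest_failed_query(execution_logs: list[str]) -> str:
--     """Return the SQL query associated with the most recent failure."""
--
--     result = ""
--     last_query = ""
--     for log in execution_logs:
--         if "pipeline execution failed" in log.lower():
--             result = last_query
--         if "SQL Query: " in log:
--             last_query = log.split("SQL Query: ", maxsplit=1)[1].strip()
--     return result
-- ===== Notes on version B (the rewrite author's own statement) =====
-- stated objective: simpler
-- what changed: Replaced the two backward index scans (find last failure, then rescan for the preceding query) with a single forward pass that tracks the last seen query and records it whenever a failure log appears.
import Mathlib
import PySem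

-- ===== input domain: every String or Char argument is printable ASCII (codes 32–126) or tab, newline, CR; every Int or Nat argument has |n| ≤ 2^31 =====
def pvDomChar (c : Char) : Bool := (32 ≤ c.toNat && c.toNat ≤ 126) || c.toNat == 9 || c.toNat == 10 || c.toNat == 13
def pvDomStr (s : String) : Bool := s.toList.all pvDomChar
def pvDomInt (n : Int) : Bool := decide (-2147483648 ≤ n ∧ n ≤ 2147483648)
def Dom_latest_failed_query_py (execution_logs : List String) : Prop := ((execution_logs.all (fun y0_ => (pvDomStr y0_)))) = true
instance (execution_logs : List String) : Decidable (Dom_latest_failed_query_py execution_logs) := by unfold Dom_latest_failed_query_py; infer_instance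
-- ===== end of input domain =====

-- B replaces A's two backward index scans by one forward pass tracking the last seen query (objective: simpler).

-- ===== PORT A =====
-- shared by both ports: both Pythons contain `log.split("SQL Query: ", maxsplit=1)[1].strip()` verbatim
def pvExtract (log : String) : String :=
  PySem.Str.strip (((PySem.Str.splitMax? log "SQL Query: " 1).getD [])[1]?.getD "")

-- `for index in range(len(logs)-1, -1, -1): … break` as descending recursion; fuel k = index + 1
def pvA_loop1 (logs : List String) : Nat → Option Nat
  | 0 => none
  | k + 1 =>
      if PySem.Str.isIn "pipeline execution failed" (PySem.Str.lower (logs.getD k "")) then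
        some k
      else pvA_loop1 logs k

-- `for index in range(failure_index-1, -1, -1): …` (accesses are always in range)
def pvA_loop2 (logs : List String) : Nat → String
  | 0 => ""
  | k + 1 =>
      let log := logs.getD k ""
      if PySem.Str.isIn "SQL Query: " log then pvExtract log
      else pvA_loop2 logs k

def latest_failed_query_py (execution_logs : List String) : String :=
  match pvA_loop1 execution_logs execution_logs.length with
  | none => ""
  | some failureIndex => pvA_loop2 execution_logs failureIndex

-- ===== PORT B =====
def pvB_step (st : String × String) (log : String) : String × String :=
  let result := if PySem.Str.isIn "pipeline execution failed" (PySem.Str.lower log) then st.2 else st.1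
  let lastQuery := if PySem.Str.isIn "SQL Query: " log then pvExtract log else st.2
  (result, lastQuery)

def latest_failed_query_py_alt (execution_logs : List String) : String :=
  (execution_logs.foldl pvB_step ("", "")).1

-- ===== PRECONDITION & SPEC =====
def Spec_latest_failed_query_py (execution_logs : List String) (out : String) : Prop := out = latest_failed_query_py_alt execution_logs
instance (execution_logs : List String) (out : String) : Decidable (Spec_latest_failed_query_py execution_logs out) := by unfold Spec_latest_failed_query_py; infer_instance

-- ===== CLAIM (what is proved, stated in full; the proofs are below) =====
def Claim_equal_latest_failed_query_py : Prop := ∀ (execution_logs : List String), Dom_latest_failed_query_py execution_logs → Spec_latest_failed_query_py execution_logs (latest_failed_query_py execution_logs)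

-- ===== LEMMAS AND PROOFS =====

-- the "last query so far" value, as B's fold maintains it in its second component
def pvLastQ (logs : List String) : String :=
  logs.foldl (fun acc log => if PySem.Str.isIn "SQL Query: " log then pvExtract log else acc) ""

theorem pvB_snd (logs : List String) (st : String × String) :
    (logs.foldl pvB_step st).2
      = logs.foldl (fun acc log => if PySem.Str.isIn "SQL Query: " log then pvExtract log else acc) st.2 := by
  induction logs generalizing st with
  | nil => rfl
  | cons x xs ih => simp [pvB_step, ih]

theorem pvA_loop1_lt (l : List String) (k i : Nat) (h : pvA_loop1 l k = some i) : i < k := by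
  induction k with
  | zero => simp [pvA_loop1] at h
  | succ k ih =>
      rw [pvA_loop1] at h
      split at h
      · cases h; omega
      · exact Nat.lt_succ_of_lt (ih h)

theorem pvA_loop1_append (l : List String) (x : String) (k : Nat) (hk : k ≤ l.length) :
    pvA_loop1 (l ++ [x]) k = pvA_loop1 l k := by
  induction k with
  | zero => rfl
  | succ k ih =>
      have hk' : k < l.length := hk
      simp [pvA_loop1, List.getD_eq_getElem?_getD, List.getElem?_append_left hk',
        ih (Nat.le_of_lt hk')]

theorem pvA_loop2_append (l : List String) (x : String) (k : Nat) (hk : k ≤ l.length) :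
    pvA_loop2 (l ++ [x]) k = pvA_loop2 l k := by
  induction k with
  | zero => rfl
  | succ k ih =>
      have hk' : k < l.length := hk
      simp [pvA_loop2, List.getD_eq_getElem?_getD, List.getElem?_append_left hk',
        ih (Nat.le_of_lt hk')]

theorem pvA_loop2_eq_lastQ (l : List String) (k : Nat) (hk : k ≤ l.length) :
    pvA_loop2 l k = pvLastQ (l.take k) := by
  induction k with
  | zero => rfl
  | succ k ih =>
      have hk' : k < l.length := hk
      have ht : l.take (k + 1) = l.take k ++ [l.getD k ""] := by
        rw [List.take_add_one]
        simp [List.getD_eq_getElem?_getD, List.getElem?_eq_getElem hk']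
      rw [ht]
      simp only [pvA_loop2, pvLastQ, List.foldl_append, List.foldl_cons, List.foldl_nil,
        ih (Nat.le_of_lt hk')]

theorem pvMain (l : List String) : latest_failed_query_py l = latest_failed_query_py_alt l := by
  induction l using List.reverseRecOn with
  | nil => rfl
  | append_singleton l x ih =>
      unfold latest_failed_query_py latest_failed_query_py_alt
      rw [List.foldl_append]
      simp only [List.length_append, List.length_singleton, List.foldl_cons, List.foldl_nil]
      have hget : (l ++ [x]).getD l.length "" = x := by
        simp [List.getD_eq_getElem?_getD]
      rw [pvA_loop1, hget]
      by_cases hfail : PySem.Str.isIn "pipeline execution failed" (PySem.Str.lower x) = true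
      · rw [if_pos hfail]
        show pvA_loop2 (l ++ [x]) l.length = (pvB_step (List.foldl pvB_step ("", "") l) x).1
        rw [pvA_loop2_append l x l.length le_rfl,
          pvA_loop2_eq_lastQ l l.length le_rfl, List.take_length]
        simp only [pvB_step]
        rw [if_pos hfail, pvB_snd]
        rfl
      · rw [if_neg hfail, pvA_loop1_append l x l.length le_rfl]
        have hB : (pvB_step (List.foldl pvB_step ("", "") l) x).1
            = (List.foldl pvB_step ("", "") l).1 := by
          simp only [pvB_step]
          rw [if_neg hfail]
        rw [hB]
        unfold latest_failed_query_py latest_failed_query_py_alt at ih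
        cases h : pvA_loop1 l l.length with
        | none => rw [h] at ih; exact ih
        | some fi =>
            rw [h] at ih
            simp only
            rw [pvA_loop2_append l x fi (Nat.le_of_lt (pvA_loop1_lt l l.length fi h))]
            exact ih

-- ===== VERDICT (by name: the statement is the Claim_ definition above) =====
theorem latest_failed_query_py_spec : Claim_equal_latest_failed_query_py := by
  intro l _
  unfold Spec_latest_failed_query_py
  exact pvMain l
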